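-- pv_equiv track=rewrite | github.com/travis-w/Draughts-Bot | main.py | safe_pieces
-- ===== SOURCE A (Python) =====
-- def safe_pieces(board, player):
--     """ Get number of safe pieces
--
--     Get number of pieces that are safe for the rest of the game. IE, past
--         every opponent piece
--
--     :param dict board: Board to look at
--
--     :param int player: Player to look at board for
--
--     :returns List of pieces that are safe for given player
--
--     """
--     # To get least moved piece get min y for player 1 and max y for 2
--     min_max = {1: min, 2: max}
--
--     # Get opponent
--     opp = 2 if player == 1 else 1
--
--     # Get lowest opponent
--     if len(board[opp]) == 0:
--         return board[player]
--
--     lowest = min_max[opp](board[opp], key=lambda x: x[0])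
--
--     # Get list of pieces "lower" than lowest opponent
--     if opp == 2:
--         safe = [x for x in board[player] if x[0] >= lowest[0]]
--     else:
--         safe = [x for x in board[player] if x[0] <= lowest[0]]
--
--     return safe
-- ===== SOURCE B (Python) =====
-- def safe_pieces(board, player):
--     """Pieces of `player` past every opponent piece: test each piece
--     directly against all opponent pieces (no separate min/max pass)."""
--     opp = 2 if player == 1 else 1
--     if player == 1:
--         return [x for x in board[player] if all(x[0] >= o[0] for o in board[opp])]
--     return [x for x in board[player] if all(x[0] <= o[0] for o in board[opp])]
-- ===== Notes on version B (the rewrite author's own statement) =====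
-- stated objective: alternative
-- what changed: B drops the empty-opponent early return and the separate min/max pass entirely: each player piece is kept iff it compares favourably with every opponent piece via all(), one nested scan instead of extremum-then-filter.
import Mathlib
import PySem

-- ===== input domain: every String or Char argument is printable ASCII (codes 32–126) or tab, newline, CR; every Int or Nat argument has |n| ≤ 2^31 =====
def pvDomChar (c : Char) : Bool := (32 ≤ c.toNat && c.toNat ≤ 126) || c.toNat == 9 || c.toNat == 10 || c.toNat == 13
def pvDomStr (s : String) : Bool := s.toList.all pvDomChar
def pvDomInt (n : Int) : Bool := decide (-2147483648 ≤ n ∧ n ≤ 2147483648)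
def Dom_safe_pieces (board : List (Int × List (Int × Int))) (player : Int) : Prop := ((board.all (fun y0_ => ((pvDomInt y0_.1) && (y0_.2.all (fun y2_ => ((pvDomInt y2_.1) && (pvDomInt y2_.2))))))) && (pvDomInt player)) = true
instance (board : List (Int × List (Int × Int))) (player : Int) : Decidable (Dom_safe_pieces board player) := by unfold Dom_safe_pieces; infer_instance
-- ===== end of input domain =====

-- B replaces A's extremum-then-filter with a per-piece all() scan over the opponent pieces (alternative decomposition, same results).

-- ===== PORT A =====
-- dict lookup board[k]: first matching key in the association list
def pvLookup (board : List (Int × List (Int × Int))) (k : Int) : Option (List (Int × Int)) :=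
  (board.find? (fun p => p.1 == k)).map (·.2)

def safe_pieces (board : List (Int × List (Int × Int))) (player : Int) : List (Int × Int) :=
  let opp : Int := if player == 1 then 2 else 1
  match pvLookup board opp with
  | none => []  -- board[opp] raises KeyError; excluded by Pre_
  | some oppPieces =>
    match pvLookup board player with
    | none => []  -- board[player] raises KeyError; excluded by Pre_
    | some mine =>
      if oppPieces.length == 0 then mine
      else
        match (if opp == 2 then PySem.List.max? oppPieces (fun x => x.1)
               else PySem.List.min? oppPieces (fun x => x.1)) with
        | none => []  -- unreachable: oppPieces nonempty
        | some lowest =>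
          if opp == 2 then mine.filter (fun x => decide (x.1 ≥ lowest.1))
          else mine.filter (fun x => decide (x.1 ≤ lowest.1))

-- ===== PORT B =====
def safe_pieces_alt (board : List (Int × List (Int × Int))) (player : Int) : List (Int × Int) :=
  let opp : Int := if player == 1 then 2 else 1
  match pvLookup board player, pvLookup board opp with
  | some mine, some opps =>
      if player == 1 then
        mine.filter (fun x => opps.all (fun o => decide (x.1 ≥ o.1)))
      else
        mine.filter (fun x => opps.all (fun o => decide (x.1 ≤ o.1)))
  | _, _ => []  -- KeyError in Python; excluded by Pre_

-- ===== PRECONDITION & SPEC =====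
-- Pre_: both the player's and the opponent's key are present (otherwise A raises KeyError).
def Pre_safe_pieces (board : List (Int × List (Int × Int))) (player : Int) : Prop :=
  (pvLookup board player).isSome ∧ (pvLookup board (if player == 1 then 2 else 1)).isSome
instance (board : List (Int × List (Int × Int))) (player : Int) : Decidable (Pre_safe_pieces board player) := by unfold Pre_safe_pieces; infer_instance

def pvWitness_safe_pieces : (List (Int × List (Int × Int))) × Int :=
  ([(1, [(2, 3), (5, 1)]), (2, [(4, 0)])], 1)

def Spec_safe_pieces (board : List (Int × List (Int × Int))) (player : Int) (out : List (Int × Int)) : Prop := out = safe_pieces_alt board player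
instance (board : List (Int × List (Int × Int))) (player : Int) (out : List (Int × Int)) : Decidable (Spec_safe_pieces board player out) := by unfold Spec_safe_pieces; infer_instance

-- ===== CLAIM (what is proved, stated in full; the proofs are below) =====
def Claim_equal_safe_pieces : Prop := ∀ (board : List (Int × List (Int × Int))) (player : Int), Dom_safe_pieces board player → Pre_safe_pieces board player → Spec_safe_pieces board player (safe_pieces board player)

-- ===== LEMMAS AND PROOFS =====

theorem filter_max_eq_all (mine : List (Int × Int)) (opps : List (Int × Int)) (m : Int × Int)
    (hm : PySem.List.max? opps (fun x => x.1) = some m) :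
    mine.filter (fun x => decide (x.1 ≥ m.1)) = mine.filter (fun x => opps.all (fun o => decide (x.1 ≥ o.1))) := by
  apply List.filter_congr
  intro x _
  have hmem := PySem.List.max?_mem hm
  have hmax := PySem.List.max?_isMax hm
  rw [Bool.eq_iff_iff]
  simp only [List.all_eq_true, decide_eq_true_eq, ge_iff_le]
  constructor
  · intro h o ho; exact le_trans (hmax o ho) h
  · intro h; exact h m hmem

theorem filter_min_eq_all (mine : List (Int × Int)) (opps : List (Int × Int)) (m : Int × Int)
    (hm : PySem.List.min? opps (fun x => x.1) = some m) :
    mine.filter (fun x => decide (x.1 ≤ m.1)) = mine.filter (fun x => opps.all (fun o => decide (x.1 ≤ o.1))) := by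
  apply List.filter_congr
  intro x _
  have hmem := PySem.List.min?_mem hm
  have hmin := PySem.List.min?_isMin hm
  rw [Bool.eq_iff_iff]
  simp only [List.all_eq_true, decide_eq_true_eq]
  constructor
  · intro h o ho; exact le_trans h (hmin o ho)
  · intro h; exact h m hmem

-- ===== VERDICT (by name: the statement is the Claim_ definition above) =====
theorem safe_pieces_spec : Claim_equal_safe_pieces := by
  intro board player _ hpre
  obtain ⟨hp, ho⟩ := hpre
  unfold Spec_safe_pieces safe_pieces safe_pieces_alt
  obtain ⟨mine, hmine⟩ := Option.isSome_iff_exists.mp hp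
  obtain ⟨opps, hopps⟩ := Option.isSome_iff_exists.mp ho
  simp only [hmine, hopps]
  by_cases hpl : player = 1
  · subst hpl
    cases opps with
    | nil => simp
    | cons o t =>
      rcases h : PySem.List.max? (o :: t) (fun x : Int × Int => x.1) with _ | m
      · exact absurd ((PySem.List.max?_eq_none_iff (o :: t) (fun x => x.1)).mp h) (by simp)
      · have hne : (((o :: t) : List (Int × Int)).length == 0) = false := by simp
        simp only [show (((1 : Int) == 1)) = true from rfl, if_true, hne,
          Bool.false_eq_true, if_false]
        exact filter_max_eq_all mine (o :: t) m h
  · have h1 : (player == 1) = false := by simp [hpl]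
    simp only [h1, Bool.false_eq_true, if_false]
    cases opps with
    | nil => simp
    | cons o t =>
      rcases h : PySem.List.min? (o :: t) (fun x : Int × Int => x.1) with _ | m
      · exact absurd ((PySem.List.min?_eq_none_iff (o :: t) (fun x => x.1)).mp h) (by simp)
      · have hne : (((o :: t) : List (Int × Int)).length == 0) = false := by simp
        simp only [show (((1 : Int) == 2)) = false from rfl, hne,
          Bool.false_eq_true, if_false]
        exact filter_min_eq_all mine (o :: t) m h
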